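-- pv_equiv track=rewrite | github.com/url-classes/abb-indexador-de-palabras-JoJooodd | main.py | comparar_alfabeticamente
-- ===== SOURCE A (Python) =====
-- def comparar_alfabeticamente(texto1, texto2):
--     palabras1 = texto1.split()
--     palabras2 = texto2.split()
--
--     for palabra1, palabra2 in zip(palabras1, palabras2):
--         if palabra1 < palabra2:
--             return f"{texto1} va primero"
--         elif palabra1 > palabra2:
--             return f"{texto2} va primero"
--
--     # Si las palabras son iguales hasta el momento,
--     # se determina por la longitud total del texto
--     if len(texto1) < len(texto2):
--         return f"{texto1} va primero"
--     elif len(texto1) > len(texto2):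
--         return f"{texto2} va primero"
--     else:
--         return "Ambos textos son iguales en términos alfabéticos"
-- ===== SOURCE B (Python) =====
-- def comparar_alfabeticamente(texto1, texto2):
--     palabras1 = texto1.split()
--     palabras2 = texto2.split()
--     n = min(len(palabras1), len(palabras2))
--     clave1 = " ".join(palabras1[:n])
--     clave2 = " ".join(palabras2[:n])
--     if clave1 != clave2:
--         ganador = texto1 if clave1 < clave2 else texto2
--     elif len(texto1) != len(texto2):
--         ganador = texto1 if len(texto1) < len(texto2) else texto2
--     else:
--         return "Ambos textos son iguales en términos alfabéticos"
--     return f"{ganador} va primero"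
-- ===== Notes on version B (the rewrite author's own statement) =====
-- stated objective: alternative
-- what changed: Instead of scanning word pairs, B canonicalizes each text by space-joining its first n = min(word counts) words and decides with a single flat string comparison of the two keys (correct because split-words never contain whitespace and space sorts below every non-space printable char), then the same total-length tie-break.
import Mathlib
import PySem

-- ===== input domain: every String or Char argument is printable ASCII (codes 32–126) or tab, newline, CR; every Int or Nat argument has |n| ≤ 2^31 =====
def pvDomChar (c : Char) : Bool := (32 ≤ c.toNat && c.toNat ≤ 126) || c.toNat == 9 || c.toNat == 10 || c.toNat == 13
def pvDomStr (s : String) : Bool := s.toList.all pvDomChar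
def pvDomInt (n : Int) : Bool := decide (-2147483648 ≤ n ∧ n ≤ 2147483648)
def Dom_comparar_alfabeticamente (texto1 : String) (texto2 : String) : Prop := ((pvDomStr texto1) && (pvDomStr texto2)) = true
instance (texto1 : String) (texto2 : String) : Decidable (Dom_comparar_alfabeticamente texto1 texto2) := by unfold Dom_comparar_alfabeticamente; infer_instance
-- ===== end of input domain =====

-- ===== PORT A =====
-- B canonicalizes each text to one space-joined key of its first min-count words and
-- decides by a single flat string comparison instead of A's word-by-word scan (objective: alternative).

-- A's for-loop over zip(palabras1, palabras2); the nil case is the code after the loop.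
def pvLoopA (texto1 : String) (texto2 : String) : List (String × String) → String
  | [] =>
      if PySem.Str.len texto1 < PySem.Str.len texto2 then texto1 ++ " va primero"
      else if PySem.Str.len texto1 > PySem.Str.len texto2 then texto2 ++ " va primero"
      else "Ambos textos son iguales en términos alfabéticos"
  | (palabra1, palabra2) :: rest =>
      if palabra1 < palabra2 then texto1 ++ " va primero"
      else if palabra1 > palabra2 then texto2 ++ " va primero"
      else pvLoopA texto1 texto2 rest

def comparar_alfabeticamente (texto1 : String) (texto2 : String) : String :=
  let palabras1 := PySem.Str.split₀ texto1
  let palabras2 := PySem.Str.split₀ texto2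
  pvLoopA texto1 texto2 (palabras1.zip palabras2)

-- ===== PORT B =====
def comparar_alfabeticamente_alt (texto1 : String) (texto2 : String) : String :=
  let palabras1 := PySem.Str.split₀ texto1
  let palabras2 := PySem.Str.split₀ texto2
  let n : Int := min (palabras1.length : Int) (palabras2.length : Int)
  let clave1 := PySem.Str.join " " (PySem.List.slice palabras1 none (some n))
  let clave2 := PySem.Str.join " " (PySem.List.slice palabras2 none (some n))
  if clave1 ≠ clave2 then
    (if clave1 < clave2 then texto1 else texto2) ++ " va primero"
  else if PySem.Str.len texto1 ≠ PySem.Str.len texto2 then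
    (if PySem.Str.len texto1 < PySem.Str.len texto2 then texto1 else texto2) ++ " va primero"
  else "Ambos textos son iguales en términos alfabéticos"

-- ===== PRECONDITION & SPEC =====
def Spec_comparar_alfabeticamente (texto1 : String) (texto2 : String) (out : String) : Prop := out = comparar_alfabeticamente_alt texto1 texto2
instance (texto1 : String) (texto2 : String) (out : String) : Decidable (Spec_comparar_alfabeticamente texto1 texto2 out) := by unfold Spec_comparar_alfabeticamente; infer_instance

-- ===== CLAIM (what is proved, stated in full; the proofs are below) =====
def Claim_equal_comparar_alfabeticamente : Prop := ∀ (texto1 : String) (texto2 : String), Dom_comparar_alfabeticamente texto1 texto2 → Spec_comparar_alfabeticamente texto1 texto2 (comparar_alfabeticamente texto1 texto2)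

-- ===== LEMMAS AND PROOFS =====

-- unfolding equations for pvLoopA
theorem pvLoopA_cons (t1 t2 x y : String) (rest : List (String × String)) :
    pvLoopA t1 t2 ((x, y) :: rest) =
      if x < y then t1 ++ " va primero"
      else if x > y then t2 ++ " va primero"
      else pvLoopA t1 t2 rest := by
  simp only [pvLoopA]

-- the code after A's loop, reshaped into B's ≠/< branching
theorem pvTieEq' (t1 t2 : String) :
    (if PySem.Str.len t1 < PySem.Str.len t2 then t1 ++ " va primero"
     else if PySem.Str.len t1 > PySem.Str.len t2 then t2 ++ " va primero"
     else "Ambos textos son iguales en términos alfabéticos") =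
      (if PySem.Str.len t1 ≠ PySem.Str.len t2 then
        (if PySem.Str.len t1 < PySem.Str.len t2 then t1 else t2) ++ " va primero"
      else "Ambos textos son iguales en términos alfabéticos") := by
  split_ifs <;> first | rfl | (exfalso; omega)

theorem pvTieEq (t1 t2 : String) :
    pvLoopA t1 t2 [] =
      (if PySem.Str.len t1 ≠ PySem.Str.len t2 then
        (if PySem.Str.len t1 < PySem.Str.len t2 then t1 else t2) ++ " va primero"
      else "Ambos textos son iguales en términos alfabéticos") := by
  simp only [pvLoopA]
  exact pvTieEq' t1 t2

-- every char of every word produced by split₀.go satisfies Q, given Q on non-space input chars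
theorem pvGoChars (Q : Char → Prop) :
    ∀ (s cur : List Char) (acc : List (List Char)),
      (∀ c ∈ s, PySem.Chars.isspace c = false → Q c) →
      (∀ c ∈ cur, Q c) →
      (∀ w ∈ acc, ∀ c ∈ w, Q c) →
      ∀ w ∈ PySem.Chars.split₀.go s cur acc, ∀ c ∈ w, Q c
  | [], cur, acc => fun _ hcur hacc w hw c hc => by
      unfold PySem.Chars.split₀.go at hw
      split_ifs at hw with h
      · exact hacc w (by simpa using hw) c hc
      · rcases (by simpa using hw : w ∈ acc ∨ w = cur.reverse) with hw | hw
        · exact hacc w hw c hc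
        · exact hcur c (by rw [hw] at hc; simpa using hc)
  | d :: rest, cur, acc => fun hs hcur hacc w hw c hc => by
      unfold PySem.Chars.split₀.go at hw
      split_ifs at hw with h1 h2
      · exact pvGoChars Q rest [] acc (fun c hcs => hs c (List.mem_cons_of_mem _ hcs))
          (by simp) hacc w hw c hc
      · exact pvGoChars Q rest [] (cur.reverse :: acc)
          (fun c hcs => hs c (List.mem_cons_of_mem _ hcs)) (by simp)
          (by intro w hw' c' hc'
              rcases List.mem_cons.mp hw' with hh | hh
              · exact hcur c' (by rw [hh] at hc'; simpa using hc')
              · exact hacc w hh c' hc') w hw c hc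
      · exact pvGoChars Q rest (d :: cur) acc (fun c hcs => hs c (List.mem_cons_of_mem _ hcs))
          (by intro c' hc'
              rcases List.mem_cons.mp hc' with hh | hh
              · rw [hh]; exact hs d (by simp) (by simpa using h1)
              · exact hcur c' hh) hacc w hw c hc

theorem pvSpaceLt (c : Char) (h : 32 < c.toNat) : ' ' < c := by
  simp [Char.lt_def, UInt32.lt_iff_toNat_lt]
  exact h

-- on the printable-ASCII domain, chars of split₀ words are all > ' '
theorem pvSplitChars (t : String) (hd : pvDomStr t = true) :
    ∀ w ∈ PySem.Str.split₀ t, ∀ c ∈ w.toList, ' ' < c := by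
  intro w hw c hc
  unfold PySem.Str.split₀ at hw
  rcases List.mem_map.mp hw with ⟨ws, hws, rfl⟩
  have hc' : c ∈ ws := by simpa using hc
  exact pvGoChars (fun c => ' ' < c) t.toList [] []
    (by intro c hcs hns
        have hdc : pvDomChar c = true :=
          (List.all_eq_true.mp (by simpa [pvDomStr] using hd)) c hcs
        apply pvSpaceLt
        simp [pvDomChar] at hdc
        simp [PySem.Chars.isspace] at hns
        omega)
    (by simp) (by simp) ws (by simpa [PySem.Chars.split₀] using hws) c hc'

-- lex order is preserved when appending ' ' :: tail, since ' ' is below every char of v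
theorem pvLexAppendSpace : ∀ (u v w z : List Char), (∀ c ∈ v, ' ' < c) → u < v →
    u ++ ' ' :: w < v ++ ' ' :: z
  | [], [], _, _ => fun _ h => absurd h (List.not_lt_nil _)
  | [], d :: vt, w, z => fun hv _ => by
      simp only [List.nil_append, List.cons_append]
      exact List.cons_lt_cons_iff.mpr (Or.inl (hv d List.mem_cons_self))
  | c :: ut, [], _, _ => fun _ h => absurd h (List.not_lt_nil _)
  | c :: ut, d :: vt, w, z => fun hv h => by
      rcases List.cons_lt_cons_iff.mp h with hcd | ⟨heq, htail⟩
      · exact List.cons_lt_cons_iff.mpr (Or.inl hcd)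
      · subst heq
        exact List.cons_lt_cons_iff.mpr (Or.inr ⟨rfl,
          pvLexAppendSpace ut vt w z (fun c' hc' => hv c' (List.mem_cons_of_mem _ hc')) htail⟩)

theorem pvLexAppendLeft : ∀ (l : List Char) (a b : List Char), (l ++ a < l ++ b) ↔ a < b
  | [], a, b => by simp
  | c :: l, a, b => by
      simp only [List.cons_append, List.cons_lt_cons_iff, lt_irrefl, false_or, true_and]
      exact pvLexAppendLeft l a b

-- A's loop over equal-length word lists equals B's single comparison of space-joined keys
theorem pvKeyEq (t1 t2 : String) :
    ∀ (a b : List String), a.length = b.length →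
      (∀ w ∈ a, ∀ c ∈ w.toList, ' ' < c) → (∀ w ∈ b, ∀ c ∈ w.toList, ' ' < c) →
      pvLoopA t1 t2 (a.zip b) =
        (if PySem.Str.join " " a ≠ PySem.Str.join " " b then
          (if PySem.Str.join " " a < PySem.Str.join " " b then t1 else t2) ++ " va primero"
        else if PySem.Str.len t1 ≠ PySem.Str.len t2 then
          (if PySem.Str.len t1 < PySem.Str.len t2 then t1 else t2) ++ " va primero"
        else "Ambos textos son iguales en términos alfabéticos")
  | [], [] => fun _ _ _ => by
      simpa using pvTieEq t1 t2
  | [], _ :: _ => fun h _ _ => by simp at h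
  | _ :: _, [] => fun h _ _ => by simp at h
  | [x], [y] => fun _ _ _ => by
      have hx : PySem.Str.join " " [x] = x := by
        apply String.toList_inj.mp
        simp [PySem.Str.toList_join, PySem.Chars.join_singleton]
      have hy : PySem.Str.join " " [y] = y := by
        apply String.toList_inj.mp
        simp [PySem.Str.toList_join, PySem.Chars.join_singleton]
      rw [hx, hy, show ([x].zip [y]) = [(x, y)] from rfl, pvLoopA_cons]
      rcases lt_trichotomy x y with hxy | hxy | hxy
      · rw [if_pos hxy, if_pos (ne_of_lt hxy), if_pos hxy]
      · subst hxy
        rw [if_neg (lt_irrefl x), if_neg (lt_irrefl x), if_neg (by simp : ¬ x ≠ x)]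
        exact pvTieEq t1 t2
      · rw [if_neg (not_lt_of_gt hxy), if_pos hxy, if_pos (ne_of_lt hxy).symm,
          if_neg (not_lt_of_gt hxy)]
  | [x], y :: y' :: ys => fun h _ _ => by simp at h
  | x :: x' :: xs, [y] => fun h _ _ => by simp at h
  | x :: x' :: xs, y :: y' :: ys => fun h ha hb => by
      have hJx : (PySem.Str.join " " (x :: x' :: xs)).toList =
          x.toList ++ ' ' :: (PySem.Str.join " " (x' :: xs)).toList := by
        simp [PySem.Str.toList_join, PySem.Chars.join_cons_cons]
      have hJy : (PySem.Str.join " " (y :: y' :: ys)).toList =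
          y.toList ++ ' ' :: (PySem.Str.join " " (y' :: ys)).toList := by
        simp [PySem.Str.toList_join, PySem.Chars.join_cons_cons]
      rw [List.zip_cons_cons, pvLoopA_cons]
      rcases lt_trichotomy x y with hxy | hxy | hxy
      · have hlt : PySem.Str.join " " (x :: x' :: xs) < PySem.Str.join " " (y :: y' :: ys) := by
          rw [String.lt_iff_toList_lt, hJx, hJy]
          exact pvLexAppendSpace _ _ _ _ (fun c hc => hb y List.mem_cons_self c hc)
            (String.lt_iff_toList_lt.mp hxy)
        rw [if_pos hxy, if_pos (ne_of_lt hlt), if_pos hlt]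
      · subst hxy
        have hne : (PySem.Str.join " " (x :: x' :: xs) ≠ PySem.Str.join " " (x :: y' :: ys)) ↔
            (PySem.Str.join " " (x' :: xs) ≠ PySem.Str.join " " (y' :: ys)) := by
          rw [not_iff_not, ← String.toList_inj, ← String.toList_inj, hJx, hJy]
          simp
        have hlt : (PySem.Str.join " " (x :: x' :: xs) < PySem.Str.join " " (x :: y' :: ys)) ↔
            (PySem.Str.join " " (x' :: xs) < PySem.Str.join " " (y' :: ys)) := by
          rw [String.lt_iff_toList_lt, hJx, hJy, pvLexAppendLeft, List.cons_lt_cons_iff]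
          simp [String.lt_iff_toList_lt, PySem.Str.toList_join]
        rw [if_neg (lt_irrefl x), if_neg (lt_irrefl x),
          pvKeyEq t1 t2 (x' :: xs) (y' :: ys) (by simpa using h)
            (fun w hw => ha w (List.mem_cons_of_mem _ hw))
            (fun w hw => hb w (List.mem_cons_of_mem _ hw))]
        by_cases hJ : PySem.Str.join " " (x' :: xs) ≠ PySem.Str.join " " (y' :: ys)
        · rw [if_pos hJ, if_pos (hne.mpr hJ)]
          by_cases hl : PySem.Str.join " " (x' :: xs) < PySem.Str.join " " (y' :: ys)
          · rw [if_pos hl, if_pos (hlt.mpr hl)]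
          · rw [if_neg hl, if_neg (fun hc => hl (hlt.mp hc))]
        · rw [if_neg hJ, if_neg (fun hc => hJ (hne.mp hc))]
      · have hlt : PySem.Str.join " " (y :: y' :: ys) < PySem.Str.join " " (x :: x' :: xs) := by
          rw [String.lt_iff_toList_lt, hJx, hJy]
          exact pvLexAppendSpace _ _ _ _ (fun c hc => ha x List.mem_cons_self c hc)
            (String.lt_iff_toList_lt.mp hxy)
        rw [if_neg (not_lt_of_gt hxy), if_pos hxy, if_pos (ne_of_lt hlt).symm,
          if_neg (not_lt_of_gt hlt)]

-- ===== VERDICT (by name: the statement is the Claim_ definition above) =====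
theorem comparar_alfabeticamente_spec : Claim_equal_comparar_alfabeticamente := by
  intro texto1 texto2 hdom
  unfold Dom_comparar_alfabeticamente at hdom
  rw [Bool.and_eq_true] at hdom
  unfold Spec_comparar_alfabeticamente comparar_alfabeticamente comparar_alfabeticamente_alt
  set p1 := PySem.Str.split₀ texto1 with hp1
  set p2 := PySem.Str.split₀ texto2 with hp2
  have hn : min (p1.length : Int) (p2.length : Int) = ((min p1.length p2.length : Nat) : Int) := by
    exact_mod_cast (Nat.cast_min ..).symm
  simp only [hn, PySem.List.slice_to_natCast]
  rw [List.zip_eq_zip_take_min]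
  exact pvKeyEq texto1 texto2 _ _ (by simp)
    (fun w hw => pvSplitChars texto1 hdom.1 w (List.mem_of_mem_take hw))
    (fun w hw => pvSplitChars texto2 hdom.2 w (List.mem_of_mem_take hw))
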